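-- pv_equiv track=rewrite | github.com/Hotheadthing/DSA | Very large power.py | solve
-- ===== SOURCE A (Python) =====
-- def power(x, y, m):
--     if y == 0:
--         return 1
--     w = power(x, y//2, m)
--     if y % 2 == 0:
--         return ((w*w) % m) % m
--     else:
--         return((w*w) % m * (x % m)) % m
--
-- def solve(A, B):
--     M = 1000000007
--     mod = 1000000007
--     M = mod
--     initial = 2
--     ans = 1
--     while initial <= B:
--         ans = (ans * initial) % (mod - 1)
--         initial += 1
--     return power(A, ans, M)
-- ===== SOURCE B (Python) =====
-- def solve(A, B):
--     M = 1000000007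
--     e = 1
--     for i in range(2, B + 1):
--         e = e * i % (M - 1)
--     result = 1
--     base = A % M
--     y = e
--     while y > 0:
--         if y % 2 == 1:
--             result = result * base % M
--         base = base * base % M
--         y //= 2
--     return result
-- ===== Notes on version B (the rewrite author's own statement) =====
-- stated objective: alternative
-- what changed: The factorial exponent is accumulated by a fold over range(2,B+1) instead of a hand-stepped while loop, and the recursive modular exponentiation helper is replaced by an iterative binary-exponentiation loop (square the base, multiply into the result on odd bits).
import Mathlib
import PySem

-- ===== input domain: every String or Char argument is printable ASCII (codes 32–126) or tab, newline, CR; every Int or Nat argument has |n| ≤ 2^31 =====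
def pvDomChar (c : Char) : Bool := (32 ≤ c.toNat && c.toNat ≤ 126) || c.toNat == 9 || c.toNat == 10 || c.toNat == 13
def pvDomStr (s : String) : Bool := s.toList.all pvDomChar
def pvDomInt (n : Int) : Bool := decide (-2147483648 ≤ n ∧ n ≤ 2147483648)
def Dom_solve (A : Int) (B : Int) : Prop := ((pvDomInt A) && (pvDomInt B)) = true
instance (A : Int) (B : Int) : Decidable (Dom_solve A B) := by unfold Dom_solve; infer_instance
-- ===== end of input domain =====

-- B replaces the recursive power helper by an iterative binary-exponentiation loop and folds the
-- factorial-mod loop over range(2, B+1); same cost, different structure (objective: alternative).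


-- ===== PORT A =====
-- power(x, y, m); Python diverges for y < 0 (never reached from solve: its exponent is ≥ 0),
-- so the y = 0 base case is written as the totality guard y ≤ 0; exact for all y ≥ 0.
def powerA (x : Int) (y : Int) (m : Int) : Int :=
  if _h : y ≤ 0 then 1
  else
    let w := powerA x (PySem.Int.floordiv y 2) m
    if PySem.Int.mod y 2 = 0 then PySem.Int.mod (PySem.Int.mod (w * w) m) m
    else PySem.Int.mod (PySem.Int.mod (w * w) m * PySem.Int.mod x m) m
termination_by y.toNat
decreasing_by
  rw [PySem.Int.floordiv_eq_ediv_of_pos (by omega)]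
  omega

-- the while-loop of solve: ans = (ans * initial) % (mod - 1); initial += 1
def loopA (B : Int) (initial : Int) (ans : Int) : Int :=
  if initial ≤ B then loopA B (initial + 1) (PySem.Int.mod (ans * initial) 1000000006)
  else ans
termination_by (B + 1 - initial).toNat
decreasing_by omega

def solve (A : Int) (B : Int) : Int :=
  powerA A (loopA B 2 1) 1000000007

-- ===== PORT B =====
-- iterative binary exponentiation: while y > 0: odd → result = result*base % m; square base; y //= 2
def binpowB (result : Int) (base : Int) (y : Int) (m : Int) : Int :=
  if _h : 0 < y then
    binpowB (if PySem.Int.mod y 2 = 1 then PySem.Int.mod (result * base) m else result)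
            (PySem.Int.mod (base * base) m)
            (PySem.Int.floordiv y 2) m
  else result
termination_by y.toNat
decreasing_by
  rw [PySem.Int.floordiv_eq_ediv_of_pos (by omega)]
  omega

def solve_alt (A : Int) (B : Int) : Int :=
  let e := (PySem.List.pyRange 2 (B + 1) 1).foldl
             (fun e i => PySem.Int.mod (e * i) 1000000006) 1
  binpowB 1 (PySem.Int.mod A 1000000007) e 1000000007

-- ===== PRECONDITION & SPEC =====
def Spec_solve (A : Int) (B : Int) (out : Int) : Prop := out = solve_alt A B
instance (A : Int) (B : Int) (out : Int) : Decidable (Spec_solve A B out) := by unfold Spec_solve; infer_instance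

-- ===== CLAIM (what is proved, stated in full; the proofs are below) =====
def Claim_equal_solve : Prop := ∀ (A : Int) (B : Int), Dom_solve A B → Spec_solve A B (solve A B)

-- ===== LEMMAS AND PROOFS =====

-- the while loop of A equals the fold of B over range(initial, B+1)
theorem loopA_eq_foldl (B : Int) (initial ans : Int) :
    loopA B initial ans =
      (PySem.List.pyRange initial (B + 1) 1).foldl
        (fun e i => PySem.Int.mod (e * i) 1000000006) ans := by
  by_cases h : initial ≤ B
  · rw [loopA, if_pos h, PySem.List.pyRange_one_cons (by omega), List.foldl_cons,
      loopA_eq_foldl B (initial + 1)]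
  · rw [loopA, if_neg h, PySem.List.pyRange_one_eq_nil (by omega), List.foldl_nil]
termination_by (B + 1 - initial).toNat
decreasing_by omega

theorem foldl_nonneg (l : List Int) (ans : Int) (h : 0 ≤ ans) :
    0 ≤ l.foldl (fun e i => PySem.Int.mod (e * i) 1000000006) ans := by
  induction l generalizing ans with
  | nil => exact h
  | cons x xs ih =>
    refine ih _ ?_
    show 0 ≤ PySem.Int.mod (ans * x) 1000000006
    rw [PySem.Int.mod_eq_emod_of_pos (by norm_num)]
    exact Int.emod_nonneg _ (by norm_num)

-- a % n % n ≡ a, as a ModEq fact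
theorem emod_modeq (a n : Int) : Int.ModEq n (a % n) a :=
  Int.emod_emod_of_dvd a dvd_rfl

-- A's recursive power computes x ^ y mod 1000000007 for 0 < y
theorem powerA_eq (x : Int) (y : Int) (hy : 0 < y) :
    powerA x y 1000000007 = x ^ y.toNat % 1000000007 := by
  rw [powerA, dif_neg (by omega)]
  rw [PySem.Int.floordiv_eq_ediv_of_pos (show (0:Int) < 2 by norm_num),
      PySem.Int.mod_eq_emod_of_pos (show (0:Int) < 2 by norm_num)]
  simp only [PySem.Int.mod_eq_emod_of_pos (show (0:Int) < 1000000007 by norm_num)]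
  have hw : powerA x (y / 2) 1000000007 = x ^ (y / 2).toNat % 1000000007 := by
    by_cases h2 : 0 < y / 2
    · exact powerA_eq x (y / 2) h2
    · have hz : y / 2 = 0 := by omega
      rw [hz, powerA, dif_pos (by norm_num)]
      norm_num
  rw [hw]
  have hsplit : y.toNat = (y / 2).toNat + (y / 2).toNat + (y % 2).toNat := by omega
  have hm := emod_modeq (x ^ (y / 2).toNat) 1000000007
  by_cases hpar : y % 2 = 0
  · rw [if_pos hpar]
    show Int.ModEq 1000000007
      (x ^ (y / 2).toNat % 1000000007 * (x ^ (y / 2).toNat % 1000000007) % 1000000007)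
      (x ^ y.toNat)
    have h2 : x ^ (y / 2).toNat * x ^ (y / 2).toNat = x ^ y.toNat := by
      rw [hsplit, hpar]; simp [pow_add]
    exact h2 ▸ ((emod_modeq _ _).trans (hm.mul hm))
  · rw [if_neg (by omega)]
    show Int.ModEq 1000000007
      (x ^ (y / 2).toNat % 1000000007 * (x ^ (y / 2).toNat % 1000000007) % 1000000007 *
        (x % 1000000007)) (x ^ y.toNat)
    have h1 : y % 2 = 1 := by omega
    have h2 : x ^ (y / 2).toNat * x ^ (y / 2).toNat * x = x ^ y.toNat := by
      rw [hsplit, h1]; simp [pow_add]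
    exact h2 ▸ (((emod_modeq _ _).trans (hm.mul hm)).mul (emod_modeq x 1000000007))
termination_by y.toNat
decreasing_by omega

-- B's iterative loop computes result * base ^ y mod 1000000007 for 0 < y
theorem binpowB_eq (r b : Int) (y : Int) (hy : 0 < y) :
    binpowB r b y 1000000007 = r * b ^ y.toNat % 1000000007 := by
  rw [binpowB, dif_pos hy]
  rw [PySem.Int.floordiv_eq_ediv_of_pos (show (0:Int) < 2 by norm_num),
      PySem.Int.mod_eq_emod_of_pos (show (0:Int) < 2 by norm_num)]
  simp only [PySem.Int.mod_eq_emod_of_pos (show (0:Int) < 1000000007 by norm_num)]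
  have hsplit : y.toNat = (y / 2).toNat + (y / 2).toNat + (y % 2).toNat := by omega
  by_cases h2 : 0 < y / 2
  · rw [binpowB_eq _ _ (y / 2) h2]
    have hb : Int.ModEq 1000000007 ((b * b % 1000000007) ^ (y / 2).toNat)
        ((b * b) ^ (y / 2).toNat) := (emod_modeq (b * b) 1000000007).pow _
    by_cases hpar : y % 2 = 1
    · rw [if_pos hpar]
      show Int.ModEq 1000000007
        (r * b % 1000000007 * (b * b % 1000000007) ^ (y / 2).toNat) (r * b ^ y.toNat)
      have he : r * b * (b * b) ^ (y / 2).toNat = r * b ^ y.toNat := by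
        rw [hsplit, hpar]; rw [show (1:Int).toNat = 1 from rfl]; ring
      exact he ▸ ((emod_modeq (r * b) 1000000007).mul hb)
    · rw [if_neg hpar]
      show Int.ModEq 1000000007
        (r * (b * b % 1000000007) ^ (y / 2).toNat) (r * b ^ y.toNat)
      have hp0 : y % 2 = 0 := by omega
      have he : r * (b * b) ^ (y / 2).toNat = r * b ^ y.toNat := by
        rw [hsplit, hp0]; rw [show (0:Int).toNat = 0 from rfl]; ring
      exact he ▸ ((Int.ModEq.refl r).mul hb)
  · -- y = 1: the recursive call returns its result argument unchanged
    have h1 : y = 1 := by omega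
    subst h1
    norm_num
    rw [binpowB, dif_neg (by norm_num)]
termination_by y.toNat
decreasing_by omega

-- ===== VERDICT (by name: the statement is the Claim_ definition above) =====
theorem solve_spec : Claim_equal_solve := by
  intro A B _
  unfold Spec_solve solve solve_alt
  rw [loopA_eq_foldl]
  set e := (PySem.List.pyRange 2 (B + 1) 1).foldl
             (fun e i => PySem.Int.mod (e * i) 1000000006) 1 with he
  have he0 : 0 ≤ e := foldl_nonneg _ 1 (by norm_num)
  by_cases hpos : 0 < e
  · rw [powerA_eq A e hpos, binpowB_eq 1 _ e hpos, one_mul]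
    rw [PySem.Int.mod_eq_emod_of_pos (show (0:Int) < 1000000007 by norm_num)]
    exact ((emod_modeq A 1000000007).pow e.toNat).symm
  · have hz : e = 0 := by omega
    rw [hz, powerA, dif_pos (by norm_num), binpowB, dif_neg (by norm_num)]
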